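-- pv_equiv track=rewrite | github.com/MrBrantCode/unitest_baseline | mut_generate/mist_train_cf/cf_6808/solution.py | simplify_phrase
-- ===== SOURCE A (Python) =====
-- def simplify_phrase(sentence):
--     phrases = {
--         "altercations and contentions": "conflict",
--         "dissenting opinions": "objection",
--         "complex and innovative ideas": "proposals",
--         "strict time limit": "deadline"
--     }
--     for phrase, word in phrases.items():
--         sentence = sentence.replace(phrase, word)
--     return sentence
-- ===== SOURCE B (Python) =====
-- PHRASES = [
--     ("altercations and contentions", "conflict"),
--     ("dissenting opinions", "objection"),
--     ("complex and innovative ideas", "proposals"),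
--     ("strict time limit", "deadline"),
-- ]
--
-- def simplify_phrase(sentence):
--     # single left-to-right scan; earlier dict entries take priority at each position
--     out = []
--     i = 0
--     n = len(sentence)
--     while i < n:
--         for phrase, word in PHRASES:
--             if sentence.startswith(phrase, i):
--                 out.append(word)
--                 i += len(phrase)
--                 break
--         else:
--             out.append(sentence[i])
--             i += 1
--     return "".join(out)
-- ===== Notes on version B (the rewrite author's own statement) =====
-- stated objective: alternative
-- what changed: B makes a single left-to-right scan over the sentence, trying the four phrases in dict order at each position, instead of A's four sequential full-string str.replace passes.
-- intended difference: On inputs containing 'complex and innovative ideastrict time limit' (two phrase occurrences sharing the letter 's'), A's chained replace re-forms 'strict time limit' out of the trailing 's' of the substituted word 'proposals' and replaces it too (at the witness A returns 'proposaldeadline'), while B returns 'proposalstrict time limit' there, replacing only text actually present in the input, which is the intended behaviour. — e.g. on simplify_phrase("complex and innovative ideastrict time limit"): A returns "proposaldeadline", B returns "proposalstrict time limit"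
import Mathlib
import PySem

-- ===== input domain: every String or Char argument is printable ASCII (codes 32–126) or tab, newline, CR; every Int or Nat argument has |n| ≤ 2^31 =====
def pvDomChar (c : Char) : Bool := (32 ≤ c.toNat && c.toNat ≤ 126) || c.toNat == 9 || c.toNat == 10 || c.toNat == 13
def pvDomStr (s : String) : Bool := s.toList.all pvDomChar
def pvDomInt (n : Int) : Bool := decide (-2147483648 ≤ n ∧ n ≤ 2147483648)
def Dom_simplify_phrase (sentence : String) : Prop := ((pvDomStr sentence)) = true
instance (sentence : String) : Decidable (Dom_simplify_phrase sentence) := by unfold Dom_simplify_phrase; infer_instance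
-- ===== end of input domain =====

-- B replaces the four phrases in one left-to-right priority scan instead of A's four
-- sequential full-string replace passes (objective: alternative algorithm, same result
-- outside the stated overlapping-phrases corner D_).

-- ===== PORT A =====
def pvDictA : PySem.Dict String String := PySem.Dict.ofList
  [("altercations and contentions", "conflict"),
   ("dissenting opinions", "objection"),
   ("complex and innovative ideas", "proposals"),
   ("strict time limit", "deadline")]

def simplify_phrase (sentence : String) : String :=
  pvDictA.items.foldl (fun s pw => PySem.Str.replace s pw.1 pw.2) sentence

-- ===== PORT B =====
def pvP1 : List Char := "altercations and contentions".toList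
def pvW1 : List Char := "conflict".toList
def pvP2 : List Char := "dissenting opinions".toList
def pvW2 : List Char := "objection".toList
def pvP3 : List Char := "complex and innovative ideas".toList
def pvW3 : List Char := "proposals".toList
def pvP4 : List Char := "strict time limit".toList
def pvW4 : List Char := "deadline".toList

-- the while-loop of Source B: at each position try the four phrases in priority order
-- (fuel = the iteration bound n of the while loop; one iteration consumes at least one char)
def pvScanBGo : Nat → List Char → List Char
  | _, [] => []
  | 0, _ :: _ => []   -- fuel exhausted; never reached, the loop starts with fuel = length
  | fuel + 1, c :: t =>
    if pvP1.isPrefixOf (c :: t) then pvW1 ++ pvScanBGo fuel (t.drop 27)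
    else if pvP2.isPrefixOf (c :: t) then pvW2 ++ pvScanBGo fuel (t.drop 18)
    else if pvP3.isPrefixOf (c :: t) then pvW3 ++ pvScanBGo fuel (t.drop 27)
    else if pvP4.isPrefixOf (c :: t) then pvW4 ++ pvScanBGo fuel (t.drop 16)
    else c :: pvScanBGo fuel t

def simplify_phrase_alt (sentence : String) : String :=
  String.ofList (pvScanBGo sentence.toList.length sentence.toList)

-- ===== PRECONDITION & SPEC =====
-- On inputs containing "complex and innovative ideastrict time limit" (two phrase
-- occurrences sharing the letter 's'), A's chained replace re-forms "strict time limit"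
-- out of the trailing 's' of the substituted word "proposals" and replaces it too;
-- B replaces only text actually present in the input, which is the intended behaviour.
def D_simplify_phrase (sentence : String) : Prop :=
  PySem.Str.isIn "complex and innovative ideastrict time limit" sentence = true
instance (sentence : String) : Decidable (D_simplify_phrase sentence) := by
  unfold D_simplify_phrase; infer_instance

def Spec_simplify_phrase (sentence : String) (out : String) : Prop :=
  ¬ D_simplify_phrase sentence → out = simplify_phrase_alt sentence
instance (sentence : String) (out : String) : Decidable (Spec_simplify_phrase sentence out) := by
  unfold Spec_simplify_phrase; infer_instance

def pvDiffWitness_simplify_phrase : String := "complex and innovative ideastrict time limit"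
def pvDiffWitnessOut_simplify_phrase : String × String :=
  ("proposaldeadline", "proposalstrict time limit")

-- ===== CLAIM (what is proved, stated in full; the proofs are below) =====
def Claim_unchanged_simplify_phrase : Prop := ∀ (sentence : String), Dom_simplify_phrase sentence → Spec_simplify_phrase sentence (simplify_phrase sentence)
def Claim_changed_simplify_phrase : Prop := Dom_simplify_phrase (pvDiffWitness_simplify_phrase) ∧ D_simplify_phrase (pvDiffWitness_simplify_phrase) ∧ simplify_phrase (pvDiffWitness_simplify_phrase) = pvDiffWitnessOut_simplify_phrase.1 ∧ simplify_phrase_alt (pvDiffWitness_simplify_phrase) = pvDiffWitnessOut_simplify_phrase.2 ∧ pvDiffWitnessOut_simplify_phrase.1 ≠ pvDiffWitnessOut_simplify_phrase.2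
def Claim_exact_simplify_phrase : Prop := ∀ (sentence : String), Dom_simplify_phrase sentence → D_simplify_phrase sentence → simplify_phrase sentence ≠ simplify_phrase_alt sentence

-- ===== LEMMAS AND PROOFS =====

-- proof-side model of Source B's scan, recursing on the string itself
def pvSim : List Char → List Char
  | [] => []
  | c :: t =>
    if pvP1.isPrefixOf (c :: t) then pvW1 ++ pvSim (t.drop 27)
    else if pvP2.isPrefixOf (c :: t) then pvW2 ++ pvSim (t.drop 18)
    else if pvP3.isPrefixOf (c :: t) then pvW3 ++ pvSim (t.drop 27)
    else if pvP4.isPrefixOf (c :: t) then pvW4 ++ pvSim (t.drop 16)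
    else c :: pvSim t
termination_by l => l.length
decreasing_by all_goals (simp; try omega)

lemma scanBGo_spec : ∀ (fuel : Nat) (l : List Char), l.length ≤ fuel →
    pvScanBGo fuel l = pvSim l := by
  intro fuel
  induction fuel with
  | zero =>
    intro l hl
    have : l = [] := by cases l <;> simp_all
    subst this
    simp [pvScanBGo, pvSim]
  | succ n ih =>
    intro l hl
    cases l with
    | nil => simp [pvScanBGo, pvSim]
    | cons c t =>
      have ht : t.length ≤ n := by simp at hl; omega
      rw [pvScanBGo, pvSim,
          ih (t.drop 27) (le_trans (by simp) ht),
          ih (t.drop 18) (le_trans (by simp) ht),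
          ih (t.drop 16) (le_trans (by simp) ht),
          ih t ht]

-- generic single-pattern left-to-right replacement scan (proof-side model of str.replace)
def sOne (old new : List Char) : List Char → List Char
  | [] => []
  | c :: t =>
    if old.isPrefixOf (c :: t) then new ++ sOne old new (t.drop (old.length - 1))
    else c :: sOne old new t
termination_by l => l.length
decreasing_by all_goals (simp; try omega)

lemma sOne_nil (old new : List Char) : sOne old new [] = [] := by simp [sOne]

lemma sOne_cons (old new : List Char) (c : Char) (t : List Char) :
    sOne old new (c :: t) =
      if old.isPrefixOf (c :: t) then new ++ sOne old new (t.drop (old.length - 1))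
      else c :: sOne old new t := by
  rw [sOne]

lemma go_spec (old new : List Char) (hne : old ≠ []) :
    ∀ (fuel : Nat) (l acc : List Char), l.length ≤ fuel →
      PySem.Chars.replace.go old new fuel l acc = acc.reverse ++ sOne old new l := by
  intro fuel
  induction fuel with
  | zero =>
    intro l acc hl
    have : l = [] := by cases l <;> simp_all
    subst this
    simp [PySem.Chars.replace.go, sOne_nil]
  | succ n ih =>
    intro l acc hl
    cases l with
    | nil => simp [PySem.Chars.replace.go, sOne_nil]
    | cons c t =>
      rw [PySem.Chars.replace.go, sOne_cons]
      by_cases h : old.isPrefixOf (c :: t)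
      · rw [if_pos h, if_pos h]
        have hlen : old.length ≥ 1 := by cases old <;> simp_all
        have hdrop : List.drop old.length (c :: t) = t.drop (old.length - 1) := by
          cases old with
          | nil => simp_all
          | cons o os => simp
        rw [hdrop, ih _ _ (by simp at hl ⊢; have := List.length_drop (l := t) (i := old.length - 1); omega)]
        simp
      · rw [if_neg h, if_neg h, ih _ _ (by simp at hl; omega)]
        simp

-- replace = sOne for nonempty old
lemma replace_eq_sOne (s old new : List Char) (hne : old ≠ []) :
    PySem.Chars.replace s old new = sOne old new s := by
  rw [PySem.Chars.replace, if_neg (by simpa using hne), go_spec old new hne s.length s [] le_rfl]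
  simp

-- "no occurrence of `old` can start inside `u`": skip u entirely
def QOk (old u : List Char) : Prop :=
  ∀ i < u.length, ¬ (u.drop i <+: old) ∧ ¬ (old <+: u.drop i)

lemma skip_of_QOk (old new : List Char) :
    ∀ (u : List Char), QOk old u →
      ∀ X, sOne old new (u ++ X) = u ++ sOne old new X := by
  intro u
  induction u with
  | nil => intro _ X; simp
  | cons c u' ih =>
    intro hq X
    have h0 := hq 0 (by simp)
    simp only [List.drop_zero] at h0
    have hq' : QOk old u' := by
      intro i hi
      have := hq (i + 1) (by simpa using Nat.succ_lt_succ hi)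
      simpa using this
    have hnp : ¬ old.isPrefixOf ((c :: u') ++ X) := by
      intro h
      rcases List.prefix_or_prefix_of_prefix (List.isPrefixOf_iff_prefix.mp h)
        (List.prefix_append (c :: u') X) with h' | h'
      · exact h0.2 h'
      · exact h0.1 h'
    rw [List.cons_append, sOne_cons, if_neg (by simpa using hnp), ih hq' X]
    simp

lemma match_sOne (old new l : List Char) (hne : old ≠ []) (h : old <+: l) :
    sOne old new l = new ++ sOne old new (l.drop old.length) := by
  cases l with
  | nil =>
    exfalso; exact hne (List.prefix_nil.mp h)
  | cons c t =>
    rw [sOne_cons, if_pos (List.isPrefixOf_iff_prefix.mpr h)]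
    congr 2
    cases old with
    | nil => exact absurd rfl hne
    | cons o os => simp

-- prefix preservation: a prefix of sOne's output that is "incompatible" with `new` was already a prefix of the input
def COk (t w : List Char) : Prop :=
  ∀ k < t.length, (t.drop k).take w.length ≠ w.take (t.length - k)

lemma pres_sOne (old new t : List Char) (hC : COk t new) :
    ∀ (l : List Char) (k : Nat), t.drop k <+: sOne old new l → t.drop k <+: l := by
  intro l
  induction l with
  | nil => intro k h; simpa [sOne_nil] using h
  | cons c l' ih =>
    intro k h
    by_cases hk : t.length ≤ k
    · rw [List.drop_eq_nil_of_le hk]; exact List.nil_prefix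
    · replace hk := Nat.lt_of_not_le hk
      rw [sOne_cons] at h
      by_cases hp : old.isPrefixOf (c :: l')
      · rw [if_pos hp] at h
        exfalso
        rcases List.prefix_or_prefix_of_prefix h (List.prefix_append new _) with h' | h'
        · have he := List.prefix_iff_eq_take.mp h'
          apply hC k hk
          rw [List.take_of_length_le (by simpa using h'.length_le)]
          rw [he]; congr 1; simp
        · have he := List.prefix_iff_eq_take.mp h'
          apply hC k hk
          have hle : t.length - k ≥ new.length := by
            have := h'.length_le; simp at this; omega
          rw [List.take_of_length_le (l := new) hle]
          exact he.symm
      · rw [if_neg hp] at h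
        have hdk : t.drop k = t[k] :: t.drop (k + 1) := List.drop_eq_getElem_cons hk
        rw [hdk, List.cons_prefix_cons] at h
        rw [hdk, List.cons_prefix_cons]
        exact ⟨h.1, ih (k + 1) h.2⟩

lemma pres_sOne' (old new t : List Char) (hC : COk t new) (l : List Char)
    (h : t <+: sOne old new l) : t <+: l := by
  have := pres_sOne old new t hC l 0 (by simpa using h)
  simpa using this

def pvT : List Char := "trict time limit".toList
def pvMagicL : List Char := "complex and innovative ideastrict time limit".toList

-- the one boundary s4 must respect: "proposals" ends in 's', which begins "strict time limit"
lemma prop_boundary (Z : List Char) (hZ : ¬ (pvT <+: Z)) :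
    sOne pvP4 pvW4 (pvW3 ++ Z) = pvW3 ++ sOne pvP4 pvW4 Z := by
  have h8 : pvW3 = "proposal".toList ++ ['s'] := by decide
  have hr : pvW3 ++ Z = "proposal".toList ++ ('s' :: Z) := by rw [h8]; simp
  rw [hr, skip_of_QOk pvP4 pvW4 "proposal".toList (by unfold QOk; decide) ('s' :: Z)]
  have hns : ¬ pvP4.isPrefixOf ('s' :: Z) := by
    intro h
    have h4 : pvP4 = 's' :: pvT := by decide
    rw [h4] at h
    have := List.isPrefixOf_iff_prefix.mp h
    rw [List.cons_prefix_cons] at this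
    exact hZ this.2
  rw [sOne_cons, if_neg (by simpa using hns), h8]
  simp

def pvChain (s : List Char) : List Char :=
  sOne pvP4 pvW4 (sOne pvP3 pvW3 (sOne pvP2 pvW2 (sOne pvP1 pvW1 s)))

lemma scanB_m1 (s : List Char) (h1 : pvP1 <+: s) :
    pvSim s = pvW1 ++ pvSim (s.drop 28) := by
  cases s with
  | nil => exact absurd (List.prefix_nil.mp h1) (by decide)
  | cons c t =>
    rw [pvSim, if_pos (List.isPrefixOf_iff_prefix.mpr h1)]
    rfl

lemma scanB_m2 (s : List Char) (h1 : ¬ pvP1 <+: s) (h2 : pvP2 <+: s) :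
    pvSim s = pvW2 ++ pvSim (s.drop 19) := by
  cases s with
  | nil => exact absurd (List.prefix_nil.mp h2) (by decide)
  | cons c t =>
    rw [pvSim, if_neg (by simpa [List.isPrefixOf_iff_prefix] using h1),
        if_pos (List.isPrefixOf_iff_prefix.mpr h2)]
    rfl

lemma scanB_m3 (s : List Char) (h1 : ¬ pvP1 <+: s) (h2 : ¬ pvP2 <+: s) (h3 : pvP3 <+: s) :
    pvSim s = pvW3 ++ pvSim (s.drop 28) := by
  cases s with
  | nil => exact absurd (List.prefix_nil.mp h3) (by decide)
  | cons c t =>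
    rw [pvSim, if_neg (by simpa [List.isPrefixOf_iff_prefix] using h1),
        if_neg (by simpa [List.isPrefixOf_iff_prefix] using h2),
        if_pos (List.isPrefixOf_iff_prefix.mpr h3)]
    rfl

lemma scanB_m4 (s : List Char) (h1 : ¬ pvP1 <+: s) (h2 : ¬ pvP2 <+: s) (h3 : ¬ pvP3 <+: s)
    (h4 : pvP4 <+: s) : pvSim s = pvW4 ++ pvSim (s.drop 17) := by
  cases s with
  | nil => exact absurd (List.prefix_nil.mp h4) (by decide)
  | cons c t =>
    rw [pvSim, if_neg (by simpa [List.isPrefixOf_iff_prefix] using h1),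
        if_neg (by simpa [List.isPrefixOf_iff_prefix] using h2),
        if_neg (by simpa [List.isPrefixOf_iff_prefix] using h3),
        if_pos (List.isPrefixOf_iff_prefix.mpr h4)]
    rfl

lemma scanB_step (c : Char) (t : List Char) (h1 : ¬ pvP1 <+: (c :: t)) (h2 : ¬ pvP2 <+: (c :: t))
    (h3 : ¬ pvP3 <+: (c :: t)) (h4 : ¬ pvP4 <+: (c :: t)) :
    pvSim (c :: t) = c :: pvSim t := by
  rw [pvSim, if_neg (by simpa [List.isPrefixOf_iff_prefix] using h1),
      if_neg (by simpa [List.isPrefixOf_iff_prefix] using h2),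
      if_neg (by simpa [List.isPrefixOf_iff_prefix] using h3),
      if_neg (by simpa [List.isPrefixOf_iff_prefix] using h4)]

-- structural chain lemmas: how the four-pass chain consumes a leading phrase / a plain char
lemma not_prefix_left {p u : List Char} (X : List Char) (h1 : ¬ p <+: u) (h2 : ¬ u <+: p) :
    ¬ p <+: u ++ X := by
  intro h
  rcases List.prefix_or_prefix_of_prefix h (List.prefix_append u X) with h' | h'
  · exact h1 h'
  · exact h2 h'

lemma chain_m1 (rest : List Char) : pvChain (pvP1 ++ rest) = pvW1 ++ pvChain rest := by
  unfold pvChain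
  rw [match_sOne pvP1 pvW1 _ (by decide) (List.prefix_append _ _), List.drop_left,
      skip_of_QOk pvP2 pvW2 pvW1 (by unfold QOk; decide),
      skip_of_QOk pvP3 pvW3 pvW1 (by unfold QOk; decide),
      skip_of_QOk pvP4 pvW4 pvW1 (by unfold QOk; decide)]

lemma chain_m2 (rest : List Char) : pvChain (pvP2 ++ rest) = pvW2 ++ pvChain rest := by
  unfold pvChain
  rw [skip_of_QOk pvP1 pvW1 pvP2 (by unfold QOk; decide),
      match_sOne pvP2 pvW2 _ (by decide) (List.prefix_append _ _), List.drop_left,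
      skip_of_QOk pvP3 pvW3 pvW2 (by unfold QOk; decide),
      skip_of_QOk pvP4 pvW4 pvW2 (by unfold QOk; decide)]

lemma chain_m3 (rest : List Char) (hT : ¬ pvT <+: rest) :
    pvChain (pvP3 ++ rest) = pvW3 ++ pvChain rest := by
  have hZ : ¬ pvT <+: sOne pvP3 pvW3 (sOne pvP2 pvW2 (sOne pvP1 pvW1 rest)) := by
    intro h
    have h1' := pres_sOne' pvP3 pvW3 pvT (by unfold COk; decide) _ h
    have h2' := pres_sOne' pvP2 pvW2 pvT (by unfold COk; decide) _ h1'
    exact hT (pres_sOne' pvP1 pvW1 pvT (by unfold COk; decide) _ h2')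
  unfold pvChain
  rw [skip_of_QOk pvP1 pvW1 pvP3 (by unfold QOk; decide),
      skip_of_QOk pvP2 pvW2 pvP3 (by unfold QOk; decide),
      match_sOne pvP3 pvW3 _ (by decide) (List.prefix_append _ _), List.drop_left,
      prop_boundary _ hZ]

lemma chain_m4 (rest : List Char) : pvChain (pvP4 ++ rest) = pvW4 ++ pvChain rest := by
  unfold pvChain
  rw [skip_of_QOk pvP1 pvW1 pvP4 (by unfold QOk; decide),
      skip_of_QOk pvP2 pvW2 pvP4 (by unfold QOk; decide),
      skip_of_QOk pvP3 pvW3 pvP4 (by unfold QOk; decide),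
      match_sOne pvP4 pvW4 _ (by decide) (List.prefix_append _ _), List.drop_left]

lemma chain_step (c : Char) (t : List Char) (h1 : ¬ pvP1 <+: (c :: t)) (h2 : ¬ pvP2 <+: (c :: t))
    (h3 : ¬ pvP3 <+: (c :: t)) (h4 : ¬ pvP4 <+: (c :: t)) :
    pvChain (c :: t) = c :: pvChain t := by
  have e1 : sOne pvP1 pvW1 (c :: t) = c :: sOne pvP1 pvW1 t := by
    rw [sOne_cons, if_neg (by simpa [List.isPrefixOf_iff_prefix] using h1)]
  have hn2 : ¬ pvP2 <+: (c :: sOne pvP1 pvW1 t) := by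
    intro h
    rw [← e1] at h
    exact h2 (pres_sOne' pvP1 pvW1 pvP2 (by unfold COk; decide) _ h)
  have e2 : sOne pvP2 pvW2 (c :: sOne pvP1 pvW1 t) = c :: sOne pvP2 pvW2 (sOne pvP1 pvW1 t) := by
    rw [sOne_cons, if_neg (by simpa [List.isPrefixOf_iff_prefix] using hn2)]
  have hn3 : ¬ pvP3 <+: (c :: sOne pvP2 pvW2 (sOne pvP1 pvW1 t)) := by
    intro h
    rw [← e2] at h
    have := pres_sOne' pvP2 pvW2 pvP3 (by unfold COk; decide) _ h
    rw [← e1] at this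
    exact h3 (pres_sOne' pvP1 pvW1 pvP3 (by unfold COk; decide) _ this)
  have e3 : sOne pvP3 pvW3 (c :: sOne pvP2 pvW2 (sOne pvP1 pvW1 t)) = c :: sOne pvP3 pvW3 (sOne pvP2 pvW2 (sOne pvP1 pvW1 t)) := by
    rw [sOne_cons, if_neg (by simpa [List.isPrefixOf_iff_prefix] using hn3)]
  have hn4 : ¬ pvP4 <+: (c :: sOne pvP3 pvW3 (sOne pvP2 pvW2 (sOne pvP1 pvW1 t))) := by
    intro h
    rw [← e3] at h
    have := pres_sOne' pvP3 pvW3 pvP4 (by unfold COk; decide) _ h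
    rw [← e2] at this
    have := pres_sOne' pvP2 pvW2 pvP4 (by unfold COk; decide) _ this
    rw [← e1] at this
    exact h4 (pres_sOne' pvP1 pvW1 pvP4 (by unfold COk; decide) _ this)
  have e4 : sOne pvP4 pvW4 (c :: sOne pvP3 pvW3 (sOne pvP2 pvW2 (sOne pvP1 pvW1 t))) = c :: sOne pvP4 pvW4 (sOne pvP3 pvW3 (sOne pvP2 pvW2 (sOne pvP1 pvW1 t))) := by
    rw [sOne_cons, if_neg (by simpa [List.isPrefixOf_iff_prefix] using hn4)]
  unfold pvChain
  rw [e1, e2, e3, e4]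

-- if t is a prefix of rest then the magic string is a prefix of pvP3 ++ rest
lemma magic_prefix_of (rest : List Char) (h : pvT <+: rest) : pvMagicL <+: pvP3 ++ rest := by
  obtain ⟨r, rfl⟩ := h
  exact ⟨r, by rw [show pvMagicL = pvP3 ++ pvT from by decide]; simp⟩

lemma pvMain : ∀ (n : Nat) (s : List Char), s.length ≤ n → ¬ (pvMagicL <:+: s) →
    pvChain s = pvSim s := by
  intro n
  induction n with
  | zero =>
    intro s hl _
    have : s = [] := by cases s <;> simp_all
    subst this
    simp [pvChain, sOne_nil, pvSim]
  | succ n ih =>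
    intro s hl hm
    by_cases h1 : pvP1 <+: s
    · obtain ⟨rest, rfl⟩ := h1
      have hrm : ¬ pvMagicL <:+: rest := fun h => hm (h.trans (List.suffix_append _ _).isInfix)
      have hrl : rest.length ≤ n := by
        have : pvP1.length = 28 := by decide
        simp [this] at hl; omega
      rw [chain_m1, scanB_m1 _ (List.prefix_append _ _),
          show (28:Nat) = pvP1.length from rfl, List.drop_left, ih rest hrl hrm]
    · by_cases h2 : pvP2 <+: s
      · obtain ⟨rest, rfl⟩ := h2
        have hrm : ¬ pvMagicL <:+: rest := fun h => hm (h.trans (List.suffix_append _ _).isInfix)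
        have hrl : rest.length ≤ n := by
          have : pvP2.length = 19 := by decide
          simp [this] at hl; omega
        rw [chain_m2, scanB_m2 _ h1 (List.prefix_append _ _),
            show (19:Nat) = pvP2.length from rfl, List.drop_left, ih rest hrl hrm]
      · by_cases h3 : pvP3 <+: s
        · obtain ⟨rest, rfl⟩ := h3
          have hrm : ¬ pvMagicL <:+: rest := fun h => hm (h.trans (List.suffix_append _ _).isInfix)
          have hrl : rest.length ≤ n := by
            have : pvP3.length = 28 := by decide
            simp [this] at hl; omega
          have hT : ¬ pvT <+: rest := fun h => hm (magic_prefix_of rest h).isInfix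
          rw [chain_m3 rest hT, scanB_m3 _ h1 h2 (List.prefix_append _ _),
              show (28:Nat) = pvP3.length from rfl, List.drop_left, ih rest hrl hrm]
        · by_cases h4 : pvP4 <+: s
          · obtain ⟨rest, rfl⟩ := h4
            have hrm : ¬ pvMagicL <:+: rest := fun h => hm (h.trans (List.suffix_append _ _).isInfix)
            have hrl : rest.length ≤ n := by
              have : pvP4.length = 17 := by decide
              simp [this] at hl; omega
            rw [chain_m4, scanB_m4 _ h1 h2 h3 (List.prefix_append _ _),
                show (17:Nat) = pvP4.length from rfl, List.drop_left, ih rest hrl hrm]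
          · cases s with
            | nil => simp [pvChain, sOne_nil, pvSim]
            | cons c t =>
              have hl' : t.length ≤ n := by simp at hl; omega
              have hm' : ¬ pvMagicL <:+: t := fun h => hm (h.trans (List.suffix_cons c t).isInfix)
              rw [chain_step c t h1 h2 h3 h4, scanB_step c t h1 h2 h3 h4, ih t hl' hm']

-- ===== the difference region: A and B really differ on EVERY input containing the magic string =====

-- if the magic string occurs in u ++ s' but not as a prefix, and cannot start inside u,
-- then it occurs in s'
lemma infix_shift (u s' : List Char) (hu : u.length ≤ 44)
    (hov : ∀ j < u.length, 1 ≤ j → ¬ (u.drop j <+: pvMagicL))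
    (hinf : pvMagicL <:+: u ++ s') (hnp : ¬ pvMagicL <+: u ++ s') :
    pvMagicL <:+: s' := by
  obtain ⟨p, q, hpq⟩ := hinf
  by_cases hj : p.length < u.length
  · exfalso
    rcases Nat.eq_zero_or_pos p.length with hj0 | hj0
    · apply hnp
      have hp : p = [] := List.length_eq_zero_iff.mp hj0
      subst hp
      exact ⟨q, by simpa using hpq⟩
    · have hdrop : pvMagicL ++ q = (u ++ s').drop p.length := by
        rw [← hpq, List.append_assoc, List.drop_left]
      have h1 : pvMagicL <+: (u.drop p.length) ++ s' := by
        refine ⟨q, ?_⟩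
        rw [hdrop, List.drop_append_of_le_length (le_of_lt hj)]
      rcases List.prefix_or_prefix_of_prefix h1 (List.prefix_append (u.drop p.length) s') with h' | h'
      · have hlm : pvMagicL.length = 44 := by decide
        have := h'.length_le
        simp [hlm] at this
        omega
      · exact hov p.length hj hj0 h'
  · have hup : u <+: p := by
      have hppre : p <+: u ++ s' := by
        rw [← hpq, List.append_assoc]
        exact List.prefix_append p _
      rcases List.prefix_or_prefix_of_prefix (List.prefix_append u s') hppre with h' | h'
      · exact h'
      · have h1 := h'.length_le
        have h2 := List.prefix_iff_eq_take.mp h'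
        rw [List.take_of_length_le (by omega)] at h2
        rw [h2]
    obtain ⟨p', rfl⟩ := hup
    refine ⟨p', q, ?_⟩
    have : u ++ (p' ++ pvMagicL ++ q) = u ++ s' := by
      rw [← hpq]; simp
    exact (List.append_cancel_left this)

-- on a sentence starting with the magic string the two programs disagree:
-- A produces "proposaldeadline…", B produces "proposalstrict time limit…"
lemma tight_prefix (rest : List Char) :
    pvChain (pvMagicL ++ rest) ≠ pvSim (pvMagicL ++ rest) := by
  have e : pvMagicL ++ rest = pvP3 ++ (pvT ++ rest) := by
    rw [show pvMagicL = pvP3 ++ pvT from by decide, List.append_assoc]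
  rw [e]
  -- the chain: s1,s2 pass through pvP3 and pvT; s3 fires on pvP3; s4 then fires on the
  -- re-formed "strict time limit" straddling the substituted "proposals"
  have hchain : pvChain (pvP3 ++ (pvT ++ rest)) =
      "proposal".toList ++ (pvW4 ++ sOne pvP4 pvW4 (sOne pvP3 pvW3 (sOne pvP2 pvW2 (sOne pvP1 pvW1 rest)))) := by
    unfold pvChain
    rw [skip_of_QOk pvP1 pvW1 pvP3 (by unfold QOk; decide),
        skip_of_QOk pvP1 pvW1 pvT (by unfold QOk; decide),
        skip_of_QOk pvP2 pvW2 pvP3 (by unfold QOk; decide),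
        skip_of_QOk pvP2 pvW2 pvT (by unfold QOk; decide),
        match_sOne pvP3 pvW3 _ (by decide) (List.prefix_append _ _), List.drop_left,
        skip_of_QOk pvP3 pvW3 pvT (by unfold QOk; decide)]
    rw [show pvW3 ++ (pvT ++ sOne pvP3 pvW3 (sOne pvP2 pvW2 (sOne pvP1 pvW1 rest))) =
          "proposal".toList ++ (pvP4 ++ sOne pvP3 pvW3 (sOne pvP2 pvW2 (sOne pvP1 pvW1 rest))) from by
      rw [← List.append_assoc, ← List.append_assoc,
          show pvW3 ++ pvT = "proposal".toList ++ pvP4 from by decide]]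
    rw [skip_of_QOk pvP4 pvW4 "proposal".toList (by unfold QOk; decide),
        match_sOne pvP4 pvW4 _ (by decide) (List.prefix_append _ _), List.drop_left]
  have hsim : pvSim (pvP3 ++ (pvT ++ rest)) = pvW3 ++ pvSim (pvT ++ rest) := by
    rw [scanB_m3 _ (not_prefix_left _ (by decide) (by decide))
          (not_prefix_left _ (by decide) (by decide)) (List.prefix_append _ _),
        show (28:Nat) = pvP3.length from rfl, List.drop_left]
  rw [hchain, hsim, show pvW3 = "proposal".toList ++ ['s'] from by decide, List.append_assoc]
  intro h
  have h2 := List.append_cancel_left h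
  rw [show pvW4 = 'd' :: "eadline".toList from by decide] at h2
  simp at h2

lemma pvTight : ∀ (n : Nat) (s : List Char), s.length ≤ n → pvMagicL <:+: s →
    pvChain s ≠ pvSim s := by
  intro n
  induction n with
  | zero =>
    intro s hl hm
    exfalso
    have : s = [] := by cases s <;> simp_all
    subst this
    have := hm.length_le
    simp at this
    exact absurd this (by decide)
  | succ n ih =>
    intro s hl hm
    by_cases hpre : pvMagicL <+: s
    · obtain ⟨rest, rfl⟩ := hpre
      exact tight_prefix rest
    · by_cases h1 : pvP1 <+: s
      · obtain ⟨rest, rfl⟩ := h1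
        have hrm : pvMagicL <:+: rest :=
          infix_shift pvP1 rest (by decide) (by unfold pvP1 pvMagicL; decide) hm hpre
        have hrl : rest.length ≤ n := by
          have : pvP1.length = 28 := by decide
          simp [this] at hl; omega
        rw [chain_m1, scanB_m1 _ (List.prefix_append _ _),
            show (28:Nat) = pvP1.length from rfl, List.drop_left]
        intro h
        exact ih rest hrl hrm (List.append_cancel_left h)
      · by_cases h2 : pvP2 <+: s
        · obtain ⟨rest, rfl⟩ := h2
          have hrm : pvMagicL <:+: rest :=
            infix_shift pvP2 rest (by decide) (by unfold pvP2 pvMagicL; decide) hm hpre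
          have hrl : rest.length ≤ n := by
            have : pvP2.length = 19 := by decide
            simp [this] at hl; omega
          rw [chain_m2, scanB_m2 _ h1 (List.prefix_append _ _),
              show (19:Nat) = pvP2.length from rfl, List.drop_left]
          intro h
          exact ih rest hrl hrm (List.append_cancel_left h)
        · by_cases h3 : pvP3 <+: s
          · obtain ⟨rest, rfl⟩ := h3
            have hrm : pvMagicL <:+: rest :=
              infix_shift pvP3 rest (by decide) (by unfold pvP3 pvMagicL; decide) hm hpre
            have hrl : rest.length ≤ n := by
              have : pvP3.length = 28 := by decide
              simp [this] at hl; omega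
            have hT : ¬ pvT <+: rest := fun h => hpre (magic_prefix_of rest h)
            rw [chain_m3 rest hT, scanB_m3 _ h1 h2 (List.prefix_append _ _),
                show (28:Nat) = pvP3.length from rfl, List.drop_left]
            intro h
            exact ih rest hrl hrm (List.append_cancel_left h)
          · by_cases h4 : pvP4 <+: s
            · obtain ⟨rest, rfl⟩ := h4
              have hrm : pvMagicL <:+: rest :=
                infix_shift pvP4 rest (by decide) (by unfold pvP4 pvMagicL; decide) hm hpre
              have hrl : rest.length ≤ n := by
                have : pvP4.length = 17 := by decide
                simp [this] at hl; omega
              rw [chain_m4, scanB_m4 _ h1 h2 h3 (List.prefix_append _ _),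
                  show (17:Nat) = pvP4.length from rfl, List.drop_left]
              intro h
              exact ih rest hrl hrm (List.append_cancel_left h)
            · cases s with
              | nil =>
                exfalso
                have := hm.length_le
                simp at this
                exact absurd this (by decide)
              | cons c t =>
                have hrm : pvMagicL <:+: t :=
                  infix_shift [c] t (by simp) (by intro j hj hj'; simp at hj; omega) hm hpre
                have hl' : t.length ≤ n := by simp at hl; omega
                rw [chain_step c t h1 h2 h3 h4, scanB_step c t h1 h2 h3 h4]
                intro h
                exact ih t hl' hrm (by simpa using h)

lemma A_toList (s : String) : (simplify_phrase s).toList = pvChain s.toList := by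
  have hitems : pvDictA.items =
      [("altercations and contentions", "conflict"),
       ("dissenting opinions", "objection"),
       ("complex and innovative ideas", "proposals"),
       ("strict time limit", "deadline")] := by decide
  rw [simplify_phrase, hitems]
  simp only [List.foldl]
  simp only [PySem.Str.toList_replace]
  rw [replace_eq_sOne _ _ _ (by decide), replace_eq_sOne _ _ _ (by decide),
      replace_eq_sOne _ _ _ (by decide), replace_eq_sOne _ _ _ (by decide)]
  rfl

lemma B_toList (s : String) : (simplify_phrase_alt s).toList = pvSim s.toList := by
  show (String.ofList (pvScanBGo s.toList.length s.toList)).toList = _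
  rw [scanBGo_spec s.toList.length s.toList le_rfl]
  simp

-- ===== VERDICT (by name: the statement is the Claim_ definition above) =====
theorem simplify_phrase_spec : Claim_unchanged_simplify_phrase := by
  intro s _ hD
  apply String.toList_inj.mp
  rw [A_toList, B_toList]
  apply pvMain s.toList.length s.toList le_rfl
  intro hinf
  apply hD
  show PySem.Str.isIn "complex and innovative ideastrict time limit" s = true
  rw [PySem.Str.isIn_eq]
  exact (PySem.Chars.isIn_iff_infix _ _).mpr hinf

theorem simplify_phrase_changed : Claim_changed_simplify_phrase := by
  unfold Claim_changed_simplify_phrase; decide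

theorem simplify_phrase_tight : Claim_exact_simplify_phrase := by
  intro s _ hD h
  apply pvTight s.toList.length s.toList le_rfl
  · rw [D_simplify_phrase, PySem.Str.isIn_eq] at hD
    exact (PySem.Chars.isIn_iff_infix _ _).mp hD
  · rw [← A_toList, ← B_toList, h]
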